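-- pv_equiv track=rewrite | github.com/olivergs/pyevo | pyevo/strings/formatters.py | phone_number_formatter
-- ===== SOURCE A (Python) =====
-- def phone_number_formatter(value):
--     """
--     Phone number formatting in groups of 3 digits from right to left
--
--     :param value: Phone number to be formatted
--     :type value: String or integer
--     :returns: Phone number formatted value
--     :rtype: String
--     """
--     newphone=''
--     count=0
--     for char in value[::-1]:
--         newphone+=char
--         count+=1
--         if count % 3 == 0:
--             newphone+=' '
--     return newphone[::-1]
-- ===== SOURCE B (Python) =====
-- def phone_number_formatter(value):
--     rev = value[::-1]
--     groups = [rev[i:i + 3] for i in range(0, len(rev), 3)]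
--     return ''.join(g + ' ' if len(g) == 3 else g for g in groups)[::-1]
-- ===== Notes on version B (the rewrite author's own statement) =====
-- stated objective: alternative
-- what changed: B reverses once and slices the reversed string into 3-character chunks with a range-step-3 comprehension joined in one pass, instead of A's per-character loop with a modulo counter and repeated string concatenation.
import Mathlib
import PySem

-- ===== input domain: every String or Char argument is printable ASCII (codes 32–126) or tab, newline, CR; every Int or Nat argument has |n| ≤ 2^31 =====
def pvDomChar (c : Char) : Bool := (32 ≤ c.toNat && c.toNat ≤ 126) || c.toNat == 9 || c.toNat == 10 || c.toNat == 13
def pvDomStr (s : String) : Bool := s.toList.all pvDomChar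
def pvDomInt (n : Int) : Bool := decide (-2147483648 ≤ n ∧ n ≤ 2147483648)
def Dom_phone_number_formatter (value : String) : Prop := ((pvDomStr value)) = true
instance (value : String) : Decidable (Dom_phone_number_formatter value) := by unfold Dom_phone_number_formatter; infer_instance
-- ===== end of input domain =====

-- B groups the reversed string into chunks of 3 by slicing (range step 3) and joins them,
-- instead of A's per-character modulo counter; same return value on every input (alternative decomposition).

-- ===== PORT A =====
-- literal port of A: walk value[::-1], append each char, append ' ' after every 3rd char, reverse at the end
def phone_number_formatter (value : String) : String :=
  String.ofList ((value.toList.reverse.foldl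
    (fun (st : List Char × Int) c =>
      let newphone := st.1 ++ [c]
      let count := st.2 + 1
      if PySem.Int.mod count 3 = 0 then (newphone ++ [' '], count) else (newphone, count))
    ([], 0)).1.reverse)

-- ===== PORT B =====
-- literal port of B: rev = value[::-1]; groups = [rev[i:i+3] for i in range(0,len(rev),3)];
-- ''.join(g + ' ' if len(g) == 3 else g for g in groups)[::-1]
def phone_number_formatter_alt (value : String) : String :=
  let rev := value.toList.reverse
  let groups := (PySem.List.pyRange 0 (rev.length : Int) 3).map
    (fun i => PySem.List.slice rev (some i) (some (i + 3)))
  String.ofList ((groups.map (fun g => if g.length = 3 then g ++ [' '] else g)).flatten.reverse)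

-- ===== PRECONDITION & SPEC =====
def Spec_phone_number_formatter (value : String) (out : String) : Prop := out = phone_number_formatter_alt value
instance (value : String) (out : String) : Decidable (Spec_phone_number_formatter value out) := by unfold Spec_phone_number_formatter; infer_instance

-- ===== CLAIM (what is proved, stated in full; the proofs are below) =====
def Claim_equal_phone_number_formatter : Prop := ∀ (value : String), Dom_phone_number_formatter value → Spec_phone_number_formatter value (phone_number_formatter value)

-- ===== LEMMAS AND PROOFS =====

-- the common characterisation: a space after every complete group of three characters
def pvChunk : List Char → List Char
  | [] => []
  | [a] => [a]
  | [a, b] => [a, b]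
  | a :: b :: c :: rest => a :: b :: c :: ' ' :: pvChunk rest

theorem pvChunk_short (l : List Char) (h : l.length ≤ 2) : pvChunk l = l := by
  match l with
  | [] => rfl
  | [a] => rfl
  | [a, b] => rfl
  | a :: b :: c :: rest => simp at h

theorem pvLoopA (l acc : List Char) (k : Int) (hk : PySem.Int.mod k 3 = 0) :
    (l.foldl
      (fun (st : List Char × Int) c =>
        let newphone := st.1 ++ [c]
        let count := st.2 + 1
        if PySem.Int.mod count 3 = 0 then (newphone ++ [' '], count) else (newphone, count))
      (acc, k)).1 = acc ++ pvChunk l := by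
  rw [PySem.Int.mod_eq_emod_of_pos (by norm_num)] at hk
  induction l using pvChunk.induct generalizing acc k with
  | case1 => simp [pvChunk]
  | case2 a =>
    have h1 : ¬ (3 : Int) ∣ (k + 1) := by omega
    simp [List.foldl, h1, pvChunk]
  | case3 a b =>
    have h1 : ¬ (3 : Int) ∣ (k + 1) := by omega
    have h2 : ¬ (3 : Int) ∣ (k + 1 + 1) := by omega
    simp [List.foldl, h1, h2, pvChunk]
  | case4 a b c rest ih =>
    have h1 : ¬ (3 : Int) ∣ (k + 1) := by omega
    have h2 : ¬ (3 : Int) ∣ (k + 1 + 1) := by omega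
    have h3 : (3 : Int) ∣ (k + 1 + 1 + 1) := by omega
    have ih' := ih (acc ++ [a, b, c, ' ']) (k + 1 + 1 + 1) (by omega)
    simp [List.foldl, h1, h2, h3, pvChunk] at ih' ⊢
    exact ih'

theorem pvRange3_cons (a b : Int) (h : a < b) :
    PySem.List.pyRange a b 3 = a :: PySem.List.pyRange (a + 3) b 3 := by
  rw [PySem.List.pyRange_of_pos a b (by norm_num), PySem.List.pyRange_of_pos (a + 3) b (by norm_num)]
  rw [if_pos h]
  have hcount : ((b - a + 3 - 1) / 3).toNat
      = (if a + 3 < b then ((b - (a + 3) + 3 - 1) / 3).toNat else 0) + 1 := by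
    split_ifs with h3 <;> omega
  rw [hcount, List.range_succ_eq_map]
  simp only [List.map_cons, List.map_map]
  refine congrArg₂ List.cons (by norm_num) ?_
  apply List.map_congr_left
  intro k _
  simp [Function.comp]
  ring

theorem pvJoinB (n : Nat) : ∀ (full : List Char) (j : Nat), full.length = j + n →
    (((PySem.List.pyRange (j : Int) (full.length : Int) 3).map
        (fun i => PySem.List.slice full (some i) (some (i + 3)))).map
      (fun g => if g.length = 3 then g ++ [' '] else g)).flatten = pvChunk (full.drop j) := by
  induction n using Nat.strong_induction_on with
  | _ n ih =>
    intro full j hlen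
    by_cases hlt : (j : Int) < (full.length : Int)
    · rw [pvRange3_cons _ _ hlt]
      have h3 : ((3 : Int)) = ((3 : Nat) : Int) := by norm_num
      have hslice : PySem.List.slice full (some (j : Int)) (some ((j : Int) + 3))
          = (full.drop j).take 3 := by
        rw [h3, PySem.List.slice_natCast_add]
      simp only [List.map_cons, List.flatten_cons, hslice]
      have hn : 0 < n := by omega
      by_cases hge : 3 ≤ n
      · -- a full group of three
        obtain ⟨a, b, c, rest, hr⟩ : ∃ a b c rest, full.drop j = a :: b :: c :: rest := by
          have hl : (full.drop j).length = n := by simp [hlen]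
          match hdrop : full.drop j with
          | [] | [_] | [_, _] => rw [hdrop] at hl; simp at hl; omega
          | a :: b :: c :: rest => exact ⟨a, b, c, rest, rfl⟩
        rw [hr]
        have hlen3 : ((a :: b :: c :: rest).take 3).length = 3 := by simp
        rw [if_pos (by simp)]
        have htail : ((j : Int) + 3) = ((j + 3 : Nat) : Int) := by omega
        rw [htail, ih (n - 3) (by omega) full (j + 3) (by omega)]
        have hdd : full.drop (j + 3) = rest := by
          have h := congrArg (List.drop 3) hr
          rw [List.drop_drop] at h
          rw [h]; rfl
        rw [hdd]
        simp [pvChunk]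
      · -- a final short group (length 1 or 2)
        have hl : (full.drop j).length = n := by simp [hlen]
        have htake : (full.drop j).take 3 = full.drop j :=
          List.take_of_length_le (by omega)
        have hempty : PySem.List.pyRange ((j : Int) + 3) (full.length : Int) 3 = [] := by
          rw [PySem.List.pyRange_of_pos _ _ (by norm_num), if_neg (by omega)]
          rfl
        rw [htake, hempty]
        rw [if_neg (show ¬ (full.drop j).length = 3 by omega)]
        simp only [List.map_nil, List.flatten_nil, List.append_nil]
        exact (pvChunk_short _ (by omega)).symm
    · -- empty range: j is already past the end
      have hn : n = 0 := by omega
      rw [PySem.List.pyRange_of_pos _ _ (by norm_num), if_neg hlt]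
      have : full.drop j = [] := List.drop_eq_nil_of_le (by omega)
      simp [this, pvChunk]

-- ===== VERDICT (by name: the statement is the Claim_ definition above) =====
theorem phone_number_formatter_spec : Claim_equal_phone_number_formatter := by
  intro value _
  unfold Spec_phone_number_formatter phone_number_formatter phone_number_formatter_alt
  have hA := pvLoopA value.toList.reverse [] 0 (by decide)
  simp only [List.nil_append] at hA
  have hB := pvJoinB value.toList.reverse.length value.toList.reverse 0 (by simp)
  simp only [Nat.cast_zero, List.drop_zero] at hB
  simp only [hA, hB]
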